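-- pv_equiv track=rewrite | github.com/pypi-data/pypi-mirror-329 | packages/parle/parle-0.0.3-py3-none-any.whl/parle/random_reconciliation.py | get_genes
-- ===== SOURCE A (Python) =====
-- def get_genes(species, n_genes_per_species):
--     """
--     Generates a list of genes together with the
--     species mapping
--     """
--     genes= list()
--     sigma= dict()
--     idx= 0
--
--     for x in species:
--         for _ in range(n_genes_per_species):
--             genes.append(idx)
--             sigma[idx]= x
--             idx+= 1
--     return genes, sigma
-- ===== SOURCE B (Python) =====
-- def get_genes(species, n_genes_per_species):
--     """
--     Generates a list of genes together with the
--     species mapping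
--     """
--     sp = list(species)
--     total = len(sp) * n_genes_per_species
--     genes = list(range(total))
--     sigma = {i: sp[i // n_genes_per_species] for i in range(total)}
--     return genes, sigma
-- ===== Notes on version B (the rewrite author's own statement) =====
-- stated objective: simpler
-- what changed: Replaces the nested loops threading an incrementing counter with a closed form: total = len(species)*n, genes = range(total), and a dict comprehension deriving each gene's species by integer division i // n.
import Mathlib
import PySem

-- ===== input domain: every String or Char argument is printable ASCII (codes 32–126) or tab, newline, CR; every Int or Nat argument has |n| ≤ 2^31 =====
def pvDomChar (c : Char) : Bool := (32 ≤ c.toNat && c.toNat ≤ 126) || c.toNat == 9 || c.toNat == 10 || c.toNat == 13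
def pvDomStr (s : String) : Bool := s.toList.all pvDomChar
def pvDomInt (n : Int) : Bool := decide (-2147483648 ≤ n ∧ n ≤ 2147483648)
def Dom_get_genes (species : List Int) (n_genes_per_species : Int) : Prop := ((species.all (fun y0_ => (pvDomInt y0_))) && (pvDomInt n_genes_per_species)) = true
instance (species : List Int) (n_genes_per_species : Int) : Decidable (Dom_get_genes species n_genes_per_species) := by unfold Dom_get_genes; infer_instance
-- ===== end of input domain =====

-- B replaces A's counter-threading nested loops by a closed form (range(len*n) and i // n); objective: simpler.
-- ===== PORT A =====
def get_genes (species : List Int) (n_genes_per_species : Int) : List Int × (List (Int × Int)) :=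
  let st := species.foldl
    (fun (st : List Int × PySem.Dict Int Int × Int) x =>
      (PySem.List.pyRange 0 n_genes_per_species 1).foldl
        (fun st _ => (st.1 ++ [st.2.2], st.2.1.insert st.2.2 x, st.2.2 + 1)) st)
    ([], PySem.Dict.empty, 0)
  (st.1, st.2.1.items)

-- ===== PORT B =====
-- total = len(species)*n; genes = list(range(total)); sigma = {i: species[i // n] for i in range(total)}.
-- species[i // n] is ported with pyGetD (the default is never read: 0 ≤ i // n < len(species) for every i in range(total)).
def get_genes_alt (species : List Int) (n_genes_per_species : Int) : List Int × (List (Int × Int)) :=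
  let total : Int := (species.length : Int) * n_genes_per_species
  let genes := PySem.List.pyRange 0 total 1
  let sigma := PySem.Dict.ofList
    (genes.map (fun i => (i, PySem.List.pyGetD species (PySem.Int.floordiv i n_genes_per_species) 0)))
  (genes, sigma.items)

-- ===== PRECONDITION & SPEC =====
def Spec_get_genes (species : List Int) (n_genes_per_species : Int) (out : List Int × (List (Int × Int))) : Prop := out = get_genes_alt species n_genes_per_species
instance (species : List Int) (n_genes_per_species : Int) (out : List Int × (List (Int × Int))) : Decidable (Spec_get_genes species n_genes_per_species out) := by unfold Spec_get_genes; infer_instance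

-- ===== CLAIM (what is proved, stated in full; the proofs are below) =====
def Claim_equal_get_genes : Prop := ∀ (species : List Int) (n_genes_per_species : Int), Dom_get_genes species n_genes_per_species → Spec_get_genes species n_genes_per_species (get_genes species n_genes_per_species)

-- ===== LEMMAS AND PROOFS =====

-- A's inner loop from state (g, d, idx): appends idx, idx+1, … to g, inserts them into d with value x.
theorem inner_lemma (x : Int) : ∀ (l : List Int) (g : List Int) (d : PySem.Dict Int Int) (idx : Int),
    l.foldl (fun st _ => (st.1 ++ [st.2.2], st.2.1.insert st.2.2 x, st.2.2 + 1)) (g, d, idx)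
    = (g ++ PySem.List.pyRange idx (idx + l.length) 1,
       (PySem.List.pyRange idx (idx + l.length) 1).foldl (fun d i => d.insert i x) d,
       idx + l.length) := by
  intro l
  induction l with
  | nil => intro g d idx; simp [PySem.List.pyRange_one_eq_nil]
  | cons h t ih =>
    intro g d idx
    have hlt : idx < idx + ((t.length : Int) + 1) := by omega
    simp only [List.foldl_cons, ih, List.length_cons]
    push_cast
    rw [PySem.List.pyRange_one_cons hlt]
    simp only [List.foldl_cons, List.append_assoc, List.singleton_append]
    have e : idx + ((t.length : Int) + 1) = idx + 1 + t.length := by ring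
    rw [e]

-- A's whole fold, characterised: genes = range(L*n), sigma's items pair each i with species[i // n].
theorem outer_lemma (n : Int) (hn : 0 < n) : ∀ (sp : List Int),
    let res := sp.foldl
      (fun (st : List Int × PySem.Dict Int Int × Int) x =>
        (PySem.List.pyRange 0 n 1).foldl
          (fun st _ => (st.1 ++ [st.2.2], st.2.1.insert st.2.2 x, st.2.2 + 1)) st)
      ([], PySem.Dict.empty, 0)
    res.1 = PySem.List.pyRange 0 ((sp.length : Int) * n) 1 ∧
    res.2.1.items = (PySem.List.pyRange 0 ((sp.length : Int) * n) 1).map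
      (fun i => (i, PySem.List.pyGetD sp (PySem.Int.floordiv i n) 0)) ∧
    res.2.2 = (sp.length : Int) * n := by
  intro sp
  induction sp using List.reverseRecOn with
  | nil => simp [PySem.List.pyRange_one_eq_nil, PySem.Dict.empty]
  | append_singleton sp x ih =>
    obtain ⟨h1, h2, h3⟩ := ih
    set F := (fun (st : List Int × PySem.Dict Int Int × Int) x =>
        (PySem.List.pyRange 0 n 1).foldl
          (fun st _ => (st.1 ++ [st.2.2], st.2.1.insert st.2.2 x, st.2.2 + 1)) st) with hF
    set res := sp.foldl F ([], PySem.Dict.empty, 0) with hres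
    have L := (sp.length : Int) * n
    have hlen : ((PySem.List.pyRange 0 n 1).length : Int) = n := by
      rw [PySem.List.length_pyRange_one]; omega
    have hstep : (sp ++ [x]).foldl F ([], PySem.Dict.empty, 0) = F res x := by
      rw [List.foldl_append]; rfl
    rw [hstep]
    have hF2 : F res x = (res.1 ++ PySem.List.pyRange res.2.2 (res.2.2 + n) 1,
        (PySem.List.pyRange res.2.2 (res.2.2 + n) 1).foldl (fun d i => d.insert i x) res.2.1,
        res.2.2 + n) := by
      have h := inner_lemma x (PySem.List.pyRange 0 n 1) res.1 res.2.1 res.2.2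
      rw [hlen] at h
      exact h
    rw [hF2, h3]
    have hL : 0 ≤ (sp.length : Int) * n := by positivity
    have hL' : (((sp ++ [x]).length : Int)) * n = (sp.length : Int) * n + n := by
      simp [List.length_append]; ring
    have hsplit : PySem.List.pyRange 0 ((sp.length : Int) * n + n) 1
        = PySem.List.pyRange 0 ((sp.length : Int) * n) 1 ++ PySem.List.pyRange ((sp.length : Int) * n) ((sp.length : Int) * n + n) 1 :=
      PySem.List.pyRange_one_append _ _ _ hL (by omega)
    refine ⟨?_, ?_, by rw [hL']⟩
    · rw [hL', hsplit, h1]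
    · -- items side
      have hkeys : ∀ i ∈ PySem.List.pyRange ((sp.length : Int) * n) ((sp.length : Int) * n + n) 1,
          res.2.1.contains i = false := by
        intro i hi
        rw [PySem.List.mem_pyRange_one] at hi
        rw [PySem.Dict.contains_eq_decide_mem_keys]
        simp only [decide_eq_false_iff_not]
        intro hmem
        have : res.2.1.keys = res.2.1.items.map Prod.fst := rfl
        rw [this, h2] at hmem
        simp only [List.map_map, List.mem_map] at hmem
        obtain ⟨j, hj, hje⟩ := hmem
        rw [PySem.List.mem_pyRange_one] at hj
        simp at hje
        omega
      have hfresh := PySem.Dict.items_foldl_insert_fresh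
        (PySem.List.pyRange ((sp.length : Int) * n) ((sp.length : Int) * n + n) 1)
        (fun i => i) (fun _ => x) res.2.1 hkeys
        (by simpa using PySem.List.nodup_pyRange_one ((sp.length : Int) * n) ((sp.length : Int) * n + n))
      simp only at hfresh
      rw [hfresh, h2, hL', hsplit, List.map_append]
      congr 1
      · -- old segment: pyGetD (sp ++ [x]) (i // n) = pyGetD sp (i // n)
        apply List.map_congr_left
        intro i hi
        rw [PySem.List.mem_pyRange_one] at hi
        have hq0 : 0 ≤ PySem.Int.floordiv i n := by
          rw [PySem.Int.le_floordiv_iff_mul_le hn]; omega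
        have hqlt : PySem.Int.floordiv i n < (sp.length : Int) := by
          rw [PySem.Int.floordiv_lt_iff_lt_mul hn]; omega
        rw [PySem.List.pyGetD_of_nonneg _ _ hq0, PySem.List.pyGetD_of_nonneg _ _ hq0]
        have hlt' : (PySem.Int.floordiv i n).toNat < sp.length := by omega
        simp only [List.getD_eq_getElem?_getD]
        rw [List.getElem?_append_left hlt']
      · -- new segment
        apply List.map_congr_left
        intro i hi
        rw [PySem.List.mem_pyRange_one] at hi
        have hq : PySem.Int.floordiv i n = (sp.length : Int) := by
          rw [PySem.Int.floordiv_eq_iff_of_pos hn]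
          constructor <;> [omega; nlinarith [hi.1, hi.2]]
        rw [hq]
        have : PySem.List.pyGetD (sp ++ [x]) (sp.length : Int) 0 = x := by
          rw [PySem.List.pyGetD_of_nonneg _ _ (by positivity)]
          simp [List.getD_eq_getElem?_getD]
        rw [this]

-- a dict built from pairs with distinct keys has exactly those pairs as items
theorem items_ofList_of_nodup (l : List (Int × Int)) (h : (l.map Prod.fst).Nodup) :
    (PySem.Dict.ofList l).items = l := by
  have := PySem.Dict.items_foldl_insert_fresh l Prod.fst Prod.snd PySem.Dict.empty
    (by intro a _; simp) h
  simpa [PySem.Dict.ofList, PySem.Dict.update] using this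

theorem get_genes_main (species : List Int) (n : Int) :
    get_genes species n = get_genes_alt species n := by
  by_cases hn : 0 < n
  · have h := outer_lemma n hn species
    obtain ⟨h1, h2, h3⟩ := h
    simp only [get_genes, get_genes_alt]
    rw [items_ofList_of_nodup _ (by
      have : (List.map (Prod.fst ∘ fun i => (i, PySem.List.pyGetD species (PySem.Int.floordiv i n) 0))
          (PySem.List.pyRange 0 ((species.length : Int) * n) 1)) = PySem.List.pyRange 0 ((species.length : Int) * n) 1 := by
        simp [Function.comp_def]
      rw [List.map_map, this]
      exact PySem.List.nodup_pyRange_one 0 ((species.length : Int) * n))]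
    exact Prod.ext h1 h2
  · have hr : PySem.List.pyRange 0 n 1 = [] := PySem.List.pyRange_one_eq_nil (by omega)
    have hT : (species.length : Int) * n ≤ 0 :=
      mul_nonpos_of_nonneg_of_nonpos (by positivity) (by omega)
    have hr2 : PySem.List.pyRange 0 ((species.length : Int) * n) 1 = [] :=
      PySem.List.pyRange_one_eq_nil (by omega)
    simp only [get_genes, get_genes_alt]
    rw [hr, hr2]
    simp [List.foldl_fixed, PySem.Dict.ofList, PySem.Dict.update, PySem.Dict.empty]

-- ===== VERDICT (by name: the statement is the Claim_ definition above) =====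
theorem get_genes_spec : Claim_equal_get_genes := by
  intro species n _
  unfold Spec_get_genes
  exact get_genes_main species n
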